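-- pv_equiv track=rewrite | github.com/chrishokamp/constrained_decoding | scripts/run_primt_experiment.py | get_max_ref_constraint
-- ===== SOURCE A (Python) =====
-- def get_max_ref_constraint(hyp, ref, max_constraint_cutoff=3):
--     ref_constraints = []
--     hyp_toks = set(hyp)
--
--     current_sub_seq = []
--     for tok in ref:
--         if not tok in hyp_toks:
--             current_sub_seq.append(tok)
--         else:
--             if len(current_sub_seq) > 0:
--                 ref_constraints.append(current_sub_seq)
--                 current_sub_seq = []
--     if len(current_sub_seq) > 0:
--         ref_constraints.append(current_sub_seq)
--
--     longest_constraint_idx = 0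
--     len_longest = 0
--     for c_i, c in enumerate(ref_constraints):
--         if len(c) > len_longest:
--             len_longest = len(c)
--             longest_constraint_idx = c_i
--
--     if len(ref_constraints) > 0:
--         longest_constraint = ref_constraints[longest_constraint_idx][:max_constraint_cutoff]
--     else:
--         longest_constraint = []
--
--     return (ref_constraints, longest_constraint)
-- ===== SOURCE B (Python) =====
-- def get_max_ref_constraint(hyp, ref, max_constraint_cutoff=3):
--     hyp_toks = set(hyp)
--     bounds = [-1] + [i for i, t in enumerate(ref) if t in hyp_toks] + [len(ref)]
--     ref_constraints = [ref[a + 1:b] for a, b in zip(bounds, bounds[1:]) if b - a > 1]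
--     longest_constraint = (max(ref_constraints, key=len)[:max_constraint_cutoff]
--                           if ref_constraints else [])
--     return (ref_constraints, longest_constraint)
-- ===== Notes on version B (the rewrite author's own statement) =====
-- stated objective: alternative
-- what changed: Instead of A's token-by-token accumulator loop with an end-of-loop flush and an index-tracking max scan, B computes the positions of separator tokens (those in hyp), brackets them with -1 and len(ref), and materializes each constraint as a slice ref[a+1:b] between consecutive boundary positions with gap > 1, picking the longest via max(key=len).
import Mathlib
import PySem

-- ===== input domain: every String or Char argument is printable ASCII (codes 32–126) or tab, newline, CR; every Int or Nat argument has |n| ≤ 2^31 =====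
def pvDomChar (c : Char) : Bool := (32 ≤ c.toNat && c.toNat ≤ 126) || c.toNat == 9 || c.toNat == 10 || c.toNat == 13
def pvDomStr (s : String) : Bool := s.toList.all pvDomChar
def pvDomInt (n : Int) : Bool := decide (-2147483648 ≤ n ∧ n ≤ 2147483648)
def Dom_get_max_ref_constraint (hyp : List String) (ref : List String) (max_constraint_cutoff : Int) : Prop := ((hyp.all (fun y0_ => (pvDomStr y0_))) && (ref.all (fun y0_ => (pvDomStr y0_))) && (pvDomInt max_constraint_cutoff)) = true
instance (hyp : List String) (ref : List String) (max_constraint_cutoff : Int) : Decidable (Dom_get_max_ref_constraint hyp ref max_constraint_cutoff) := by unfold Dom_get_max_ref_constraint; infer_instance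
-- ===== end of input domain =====

-- B replaces A's accumulator loop + end-flush + index-tracking max scan by a boundary-position
-- decomposition: separator indices bracketed by -1/len(ref), constraints as slices between
-- consecutive boundaries with gap > 1, longest via first-max-by-length (alternative; same cost).


-- ===== PORT A =====
-- A's loop body over state (ref_constraints, current_sub_seq)
def pvStepA (key : String → Bool) (st : List (List String) × List String) (tok : String) :
    List (List String) × List String :=
  if !(key tok) then (st.1, st.2 ++ [tok])
  else if 0 < st.2.length then (st.1 ++ [st.2], ([] : List String))
  else st

-- A's max scan body over state (len_longest, longest_constraint_idx)
def pvScanA (s : Int × Int) (ci : Int × List String) : Int × Int :=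
  if (ci.2.length : Int) > s.1 then ((ci.2.length : Int), ci.1) else s

def get_max_ref_constraint (hyp : List String) (ref : List String) (max_constraint_cutoff : Int) : List (List String) × List String :=
  let hyp_toks : PySem.Set String := PySem.Set.ofList hyp
  let st := ref.foldl (pvStepA (fun t => PySem.Set.contains hyp_toks t)) ([], [])
  let ref_constraints := if 0 < st.2.length then st.1 ++ [st.2] else st.1
  let sel := (PySem.List.enumerate ref_constraints 0).foldl pvScanA (0, 0)
  let longest_constraint :=
    if 0 < ref_constraints.length then
      -- ref_constraints[longest_constraint_idx]: the index is always in range; .getD [] totalizes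
      PySem.List.slice ((PySem.List.pyGet? ref_constraints sel.2).getD []) none (some max_constraint_cutoff)
    else []
  (ref_constraints, longest_constraint)

-- ===== PORT B =====
-- [i for i, t in enumerate(ref) if t in hyp_toks]
def pvSep (key : String → Bool) (ref : List String) : List Int :=
  ((PySem.List.enumerate ref 0).filter (fun p => key p.2)).map (fun p => p.1)

-- bounds = [-1] + [i for i, t in enumerate(ref) if t in hyp_toks] + [len(ref)]
def pvBounds (key : String → Bool) (ref : List String) : List Int :=
  -1 :: (pvSep key ref ++ [(ref.length : Int)])

-- [ref[a + 1:b] for a, b in zip(bounds, bounds[1:]) if b - a > 1]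
def pvCons (ref : List String) (bounds : List Int) : List (List String) :=
  ((bounds.zip bounds.tail).filter (fun p => p.2 - p.1 > 1)).map
    (fun p => PySem.List.slice ref (some (p.1 + 1)) (some p.2))

def get_max_ref_constraint_alt (hyp : List String) (ref : List String) (max_constraint_cutoff : Int) : List (List String) × List String :=
  let hyp_toks : PySem.Set String := PySem.Set.ofList hyp
  let ref_constraints := pvCons ref (pvBounds (fun t => PySem.Set.contains hyp_toks t) ref)
  let longest_constraint :=
    if ref_constraints.isEmpty then []
    else PySem.List.slice ((PySem.List.max? ref_constraints (fun c => c.length)).getD [])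
           none (some max_constraint_cutoff)
  (ref_constraints, longest_constraint)

-- ===== PRECONDITION & SPEC =====
def Spec_get_max_ref_constraint (hyp : List String) (ref : List String) (max_constraint_cutoff : Int) (out : List (List String) × List String) : Prop := out = get_max_ref_constraint_alt hyp ref max_constraint_cutoff
instance (hyp : List String) (ref : List String) (max_constraint_cutoff : Int) (out : List (List String) × List String) : Decidable (Spec_get_max_ref_constraint hyp ref max_constraint_cutoff out) := by unfold Spec_get_max_ref_constraint; infer_instance

-- ===== CLAIM (what is proved, stated in full; the proofs are below) =====
def Claim_equal_get_max_ref_constraint : Prop := ∀ (hyp : List String) (ref : List String) (max_constraint_cutoff : Int), Dom_get_max_ref_constraint hyp ref max_constraint_cutoff → Spec_get_max_ref_constraint hyp ref max_constraint_cutoff (get_max_ref_constraint hyp ref max_constraint_cutoff)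

-- ===== LEMMAS AND PROOFS =====

-- common characterisation: the maximal runs of ref outside key, with pending run cur
def pvRuns (key : String → Bool) (cur : List String) : List String → List (List String)
  | [] => if 0 < cur.length then [cur] else []
  | t :: r => if key t then (if 0 < cur.length then cur :: pvRuns key [] r else pvRuns key [] r)
              else pvRuns key (cur ++ [t]) r

-- B's constraints as a function of key and ref
def pvSC (key : String → Bool) (ref : List String) : List (List String) :=
  pvCons ref (pvBounds key ref)

-- does ref start with a non-separator token (i.e. inside a run)?
def pvStarts (key : String → Bool) : List String → Bool
  | [] => false
  | t :: _ => !key t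

theorem pvRuns_ne_nil (key : String → Bool) :
    ∀ (ref cur : List String) (c : List String), c ∈ pvRuns key cur ref → c ≠ [] := by
  intro ref
  induction ref with
  | nil =>
    intro cur c hc
    simp only [pvRuns] at hc
    split at hc
    · rename_i h; simp at hc; subst hc; intro h0; subst h0; simp at h
    · simp at hc
  | cons t r ih =>
    intro cur c hc
    simp only [pvRuns] at hc
    split at hc
    · split at hc
      · rename_i h0
        rcases List.mem_cons.mp hc with h | h
        · subst h; intro h'; subst h'; simp at h0
        · exact ih [] c h
      · exact ih [] c hc
    · exact ih (cur ++ [t]) c hc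

theorem pvLoopA (key : String → Bool) :
    ∀ (ref : List String) (acc : List (List String)) (cur : List String),
      (let st := ref.foldl (pvStepA key) (acc, cur);
       if 0 < st.2.length then st.1 ++ [st.2] else st.1) = acc ++ pvRuns key cur ref := by
  intro ref
  induction ref with
  | nil =>
    intro acc cur
    simp only [List.foldl_nil, pvRuns]
    split <;> simp
  | cons t r ih =>
    intro acc cur
    simp only [List.foldl_cons, pvRuns, pvStepA]
    by_cases hk : key t
    · simp only [hk, Bool.not_true, if_true, Bool.false_eq_true, if_false]
      by_cases hc : 0 < cur.length
      · simp only [hc, if_true]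
        rw [ih (acc ++ [cur]) []]
        simp
      · simp only [hc, if_false]
        have hcur : cur = [] := by
          cases cur with
          | nil => rfl
          | cons a b => simp at hc
        subst hcur
        exact ih acc []
    · simp only [hk, Bool.not_false, if_true, Bool.false_eq_true, if_false]
      exact ih acc (cur ++ [t])

-- enumerate with a shifted start
theorem pvEnumShift : ∀ (xs : List String) (s : Int),
    PySem.List.enumerate xs (s + 1) = (PySem.List.enumerate xs s).map (fun p => (p.1 + 1, p.2)) := by
  intro xs
  induction xs with
  | nil => intro s; simp [PySem.List.enumerate_nil]
  | cons x r ih =>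
    intro s
    rw [PySem.List.enumerate_cons, PySem.List.enumerate_cons, List.map_cons, ← ih (s + 1)]

theorem pvSep_cons (key : String → Bool) (t : String) (r : List String) :
    pvSep key (t :: r) = (if key t then [(0 : Int)] else []) ++ (pvSep key r).map (· + 1) := by
  have h1 : PySem.List.enumerate r 1 = (PySem.List.enumerate r 0).map (fun p => (p.1 + 1, p.2)) := by
    simpa using pvEnumShift r 0
  simp only [pvSep, PySem.List.enumerate_cons, zero_add, h1, List.filter_cons]
  rw [List.filter_map, List.map_map]
  by_cases h : key t <;> simp [h] <;> rfl

theorem pvSep_nonneg (key : String → Bool) (r : List String) :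
    ∀ x ∈ pvSep key r, 0 ≤ x := by
  intro x hx
  simp only [pvSep, List.mem_map, List.mem_filter] at hx
  obtain ⟨p, ⟨hp, _⟩, rfl⟩ := hx
  rw [PySem.List.mem_enumerate_iff] at hp
  obtain ⟨k, _, rfl⟩ := hp
  simp

theorem pvBounds_ge (key : String → Bool) (r : List String) :
    ∀ x ∈ pvBounds key r, -1 ≤ x := by
  intro x hx
  simp only [pvBounds, List.mem_cons, List.mem_append] at hx
  rcases hx with rfl | hx | rfl | h
  · omega
  · have := pvSep_nonneg key r x hx; omega
  · omega
  · simp at h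

-- peeling the first boundary pair off the comprehension
theorem pvCons_head_keep (A : List String) (x y : Int) (M : List Int) (h : y - x > 1) :
    pvCons A (x :: y :: M) = PySem.List.slice A (some (x + 1)) (some y) :: pvCons A (y :: M) := by
  simp only [pvCons, List.tail_cons, List.zip_cons_cons, List.filter_cons]
  simp [h]

theorem pvCons_head_drop (A : List String) (x y : Int) (M : List Int) (h : ¬ (y - x > 1)) :
    pvCons A (x :: y :: M) = pvCons A (y :: M) := by
  simp only [pvCons, List.tail_cons, List.zip_cons_cons, List.filter_cons]
  simp [h]

-- slicing after dropping a head token: shift both bounds by one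
theorem pvSliceShift (t : String) (r : List String) (a b : Int) (ha : -1 ≤ a) (hab : b - a > 1) :
    PySem.List.slice (t :: r) (some (a + 1 + 1)) (some (b + 1))
      = PySem.List.slice r (some (a + 1)) (some b) := by
  rw [PySem.List.slice_toNat _ (by omega) (by omega),
      PySem.List.slice_toNat _ (by omega) (by omega)]
  have h1 : (a + 1 + 1).toNat = (a + 1).toNat + 1 := by omega
  have h2 : (b + 1).toNat - (a + 1 + 1).toNat = b.toNat - (a + 1).toNat := by omega
  rw [h2, h1, List.drop_succ_cons]

theorem pvCons_shift (t : String) (r : List String) :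
    ∀ (bs : List Int), (∀ x ∈ bs, -1 ≤ x) →
      pvCons (t :: r) (bs.map (· + 1)) = pvCons r bs := by
  intro bs hbs
  simp only [pvCons, ← List.map_tail, List.zip_map, List.filter_map, List.map_map]
  have hpred : ∀ p ∈ bs.zip bs.tail,
      ((fun p : Int × Int => decide (p.2 - p.1 > 1)) ∘ Prod.map (· + 1) (· + 1)) p
        = (fun p : Int × Int => decide (p.2 - p.1 > 1)) p := by
    intro p _
    obtain ⟨u, v⟩ := p
    simp only [Function.comp_apply, Prod.map]
    rw [decide_eq_decide]
    omega
  rw [List.filter_congr hpred]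
  apply List.map_congr_left
  intro p hp
  have hmem := List.mem_filter.mp hp
  have hgap : p.2 - p.1 > 1 := by simpa using hmem.2
  have hp1 : -1 ≤ p.1 := hbs p.1 (List.of_mem_zip hmem.1).1
  obtain ⟨u, v⟩ := p
  simp only [Function.comp_apply, Prod.map]
  exact pvSliceShift t r u v hp1 (by simpa using hgap)

-- the first boundary after -1: it is 0 iff ref does not start inside a run
theorem pvHead0 (key : String → Bool) (r : List String) :
    ∃ h0 rest, pvSep key r ++ [(r.length : Int)] = h0 :: rest ∧ 0 ≤ h0 ∧
      (h0 = 0 ↔ pvStarts key r = false) := by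
  cases r with
  | nil =>
    refine ⟨0, [], ?_, le_refl 0, by simp [pvStarts]⟩
    simp [pvSep, PySem.List.enumerate_nil]
  | cons x r' =>
    rw [pvSep_cons]
    by_cases hx : key x
    · refine ⟨0, (pvSep key r').map (· + 1) ++ [((x :: r').length : Int)], by simp [hx], le_refl 0, ?_⟩
      simp [pvStarts, hx]
    · simp only [hx, if_false, Bool.false_eq_true, List.nil_append]
      cases hS : pvSep key r' with
      | nil =>
        refine ⟨((x :: r').length : Int), [], by simp, by positivity, ?_⟩
        simp only [pvStarts, hx, Bool.not_false]
        constructor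
        · intro h; exfalso; rw [List.length_cons] at h; push_cast at h; omega
        · intro h; exact absurd h (by simp)
      | cons s0 S' =>
        have hs0 : 0 ≤ s0 := pvSep_nonneg key r' s0 (by rw [hS]; exact List.mem_cons_self)
        refine ⟨s0 + 1, S'.map (· + 1) ++ [((x :: r').length : Int)], by simp, by omega, ?_⟩
        simp only [pvStarts, hx, Bool.not_false]
        constructor
        · intro h; omega
        · intro h; exact absurd h (by simp)

theorem pvSC_cons_key (key : String → Bool) (t : String) (r : List String) (ht : key t = true) :
    pvSC key (t :: r) = pvSC key r := by
  have hb : pvBounds key (t :: r)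
      = -1 :: 0 :: ((pvSep key r).map (· + 1) ++ [((r.length : Int) + 1)]) := by
    simp [pvBounds, pvSep_cons, ht]
  have hmap : (pvBounds key r).map (· + 1)
      = 0 :: ((pvSep key r).map (· + 1) ++ [((r.length : Int) + 1)]) := by
    simp [pvBounds]
  rw [pvSC, hb, pvCons_head_drop _ _ _ _ (by omega), ← hmap,
      pvCons_shift t r _ (pvBounds_ge key r), ← pvSC]

-- the head slice splits off t
theorem pvSliceHead (t : String) (r : List String) (h0 : Int) (hh0 : 0 ≤ h0) :
    PySem.List.slice (t :: r) (some ((-1 : Int) + 1)) (some (h0 + 1))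
      = t :: PySem.List.slice (t :: r) (some ((0 : Int) + 1)) (some (h0 + 1)) := by
  rw [PySem.List.slice_toNat _ (by omega) (by omega),
      PySem.List.slice_toNat _ (by omega) (by omega)]
  have e1 : ((-1 : Int) + 1).toNat = 0 := by omega
  have e2 : ((0 : Int) + 1).toNat = 1 := by omega
  have e3 : (h0 + 1).toNat - 0 = ((h0 + 1).toNat - 1) + 1 := by omega
  rw [e1, e2, e3, List.drop_zero, List.take_succ_cons]
  simp

theorem pvSC_ne_nil (key : String → Bool) (r : List String) (hst : pvStarts key r = true) :
    pvSC key r ≠ [] := by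
  obtain ⟨h0, rest, hSr, hh0, hiff⟩ := pvHead0 key r
  have hh1 : 1 ≤ h0 := by
    rcases eq_or_lt_of_le hh0 with h | h
    · exfalso; rw [hiff.mp h.symm] at hst; simp at hst
    · omega
  have hb : pvBounds key r = -1 :: h0 :: rest := by rw [pvBounds, hSr]
  rw [pvSC, hb, pvCons_head_keep _ _ _ _ (by omega)]
  simp

theorem pvSC_cons_nonkey_t (key : String → Bool) (t : String) (r : List String)
    (ht : key t = false) (hst : pvStarts key r = true) :
    pvSC key (t :: r) = (t :: (pvSC key r).headD []) :: (pvSC key r).tail := by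
  obtain ⟨h0, rest, hSr, hh0, hiff⟩ := pvHead0 key r
  have hh1 : 1 ≤ h0 := by
    rcases eq_or_lt_of_le hh0 with h | h
    · exfalso; rw [hiff.mp h.symm] at hst; simp at hst
    · omega
  have hM : (pvSep key r).map (· + 1) ++ [((r.length : Int) + 1)]
      = (h0 + 1) :: rest.map (· + 1) := by
    have : (pvSep key r ++ [(r.length : Int)]).map (· + 1) = (h0 :: rest).map (· + 1) := by
      rw [hSr]
    simpa using this
  have hbM : pvBounds key (t :: r) = -1 :: (h0 + 1) :: rest.map (· + 1) := by
    simp [pvBounds, pvSep_cons, ht, hM]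
  have hmap : (pvBounds key r).map (· + 1) = 0 :: (h0 + 1) :: rest.map (· + 1) := by
    simp [pvBounds, hSr]
  have hR : pvSC key r = pvCons (t :: r) ((0 : Int) :: (h0 + 1) :: rest.map (· + 1)) := by
    rw [pvSC, ← pvCons_shift t r _ (pvBounds_ge key r), hmap]
  rw [pvSC, hbM, pvCons_head_keep _ _ _ _ (by omega), hR,
      pvCons_head_keep _ _ _ _ (by omega)]
  simp only [List.headD_cons, List.tail_cons]
  rw [pvSliceHead t r h0 hh0]

theorem pvSC_cons_nonkey_f (key : String → Bool) (t : String) (r : List String)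
    (ht : key t = false) (hst : pvStarts key r = false) :
    pvSC key (t :: r) = [t] :: pvSC key r := by
  obtain ⟨h0, rest, hSr, hh0, hiff⟩ := pvHead0 key r
  have hz : h0 = 0 := hiff.mpr hst
  subst hz
  have hM : (pvSep key r).map (· + 1) ++ [((r.length : Int) + 1)]
      = (0 + 1) :: rest.map (· + 1) := by
    have : (pvSep key r ++ [(r.length : Int)]).map (· + 1) = ((0 : Int) :: rest).map (· + 1) := by
      rw [hSr]
    simpa using this
  have hbM : pvBounds key (t :: r) = -1 :: ((0 : Int) + 1) :: rest.map (· + 1) := by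
    simp [pvBounds, pvSep_cons, ht, hM]
  have hmap : (pvBounds key r).map (· + 1) = 0 :: ((0 : Int) + 1) :: rest.map (· + 1) := by
    simp [pvBounds, hSr]
  have hR : pvSC key r = pvCons (t :: r) ((0 : Int) :: ((0 : Int) + 1) :: rest.map (· + 1)) := by
    rw [pvSC, ← pvCons_shift t r _ (pvBounds_ge key r), hmap]
  rw [pvSC, hbM, pvCons_head_keep _ _ _ _ (by omega), hR,
      pvCons_head_drop _ _ _ _ (by omega)]
  have hslice : PySem.List.slice (t :: r) (some ((-1 : Int) + 1)) (some ((0 : Int) + 1)) = [t] := by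
    rw [PySem.List.slice_toNat _ (by omega) (by omega)]
    simp
  rw [hslice]

theorem pvSC_nil (key : String → Bool) : pvSC key [] = [] := by
  have h : pvBounds key [] = [-1, 0] := by
    simp [pvBounds, pvSep, PySem.List.enumerate_nil]
  rw [pvSC, h, pvCons_head_drop _ _ _ _ (by omega)]
  simp [pvCons]

-- glue: pvRuns with pending run cur, in terms of B's slice decomposition
theorem pvRuns_eq_glue (key : String → Bool) :
    ∀ (ref cur : List String),
      pvRuns key cur ref
        = if pvStarts key ref then (cur ++ (pvSC key ref).headD []) :: (pvSC key ref).tail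
          else if cur.isEmpty then pvSC key ref else cur :: pvSC key ref := by
  intro ref
  induction ref with
  | nil =>
    intro cur
    simp only [pvRuns, pvStarts, pvSC_nil, Bool.false_eq_true, if_false]
    cases cur <;> simp
  | cons t r ih =>
    intro cur
    by_cases hk : key t
    · have hstart : pvStarts key (t :: r) = false := by simp [pvStarts, hk]
      have hruns0 : pvRuns key [] r = pvSC key r := by
        rw [ih []]
        by_cases hs : pvStarts key r
        · simp only [hs, if_true, List.nil_append]
          obtain ⟨c, cs, hc⟩ := List.exists_cons_of_ne_nil (pvSC_ne_nil key r hs)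
          rw [hc]; simp
        · simp [hs]
      simp only [pvRuns, hk, if_true, hstart, Bool.false_eq_true, if_false,
        pvSC_cons_key key t r hk, hruns0]
      cases cur <;> simp
    · have ht : key t = false := by simpa using hk
      have hstart : pvStarts key (t :: r) = true := by simp [pvStarts, ht]
      simp only [pvRuns, ht, Bool.false_eq_true, if_false, hstart, if_true]
      rw [ih (cur ++ [t])]
      by_cases hs : pvStarts key r
      · simp only [hs, if_true, pvSC_cons_nonkey_t key t r ht hs,
          List.headD_cons, List.tail_cons]
        simp
      · have hs' : pvStarts key r = false := by simpa using hs
        simp only [hs', Bool.false_eq_true, if_false,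
          pvSC_cons_nonkey_f key t r ht hs', List.headD_cons, List.tail_cons]
        simp

theorem pvSC_eq_runs (key : String → Bool) (ref : List String) :
    pvSC key ref = pvRuns key [] ref := by
  rw [pvRuns_eq_glue key ref []]
  by_cases hs : pvStarts key ref
  · simp only [hs, if_true, List.nil_append]
    obtain ⟨c, cs, hc⟩ := List.exists_cons_of_ne_nil (pvSC_ne_nil key ref hs)
    rw [hc]; simp
  · simp [hs]

-- B's running first-max-by-length
def pvBfold (b : List String) (t : List (List String)) : List String :=
  t.foldl (fun m x => if m.length < x.length then x else m) b

theorem pvMax?_cons :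
    ∀ (t : List (List String)) (b : List String),
      PySem.List.max? (b :: t) (fun c => c.length) = some (pvBfold b t) := by
  intro t
  induction t with
  | nil => intro b; simp [PySem.List.max?, pvBfold]
  | cons c t ih =>
    intro b
    have hstep : PySem.List.max? (b :: c :: t) (fun c => c.length)
        = PySem.List.max? ((if b.length < c.length then c else b) :: t) (fun c => c.length) := by
      by_cases h : b.length < c.length <;> simp [PySem.List.max?, h]
    rw [hstep]
    by_cases h : b.length < c.length
    · simp only [h, if_true]
      rw [ih c]
      simp [pvBfold, List.foldl_cons, h]
    · simp only [h, if_false]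
      rw [ih b]
      simp [pvBfold, List.foldl_cons, h]

theorem pvScanA_spec :
    ∀ (t pre : List (List String)) (b : List String) (i : Int),
      PySem.List.pyGet? (pre ++ t) i = some b →
      PySem.List.pyGet? (pre ++ t)
          (List.foldl pvScanA ((b.length : Int), i) (PySem.List.enumerate t (pre.length : Int))).2
        = some (pvBfold b t)
      ∧ (List.foldl pvScanA ((b.length : Int), i) (PySem.List.enumerate t (pre.length : Int))).1
        = ((pvBfold b t).length : Int) := by
  intro t
  induction t with
  | nil =>
    intro pre b i hb
    constructor
    · simpa [PySem.List.enumerate_nil, pvBfold] using hb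
    · simp [PySem.List.enumerate_nil, pvBfold]
  | cons c t ih =>
    intro pre b i hb
    rw [PySem.List.enumerate_cons]
    simp only [List.foldl_cons]
    have hassoc : pre ++ c :: t = (pre ++ [c]) ++ t := by simp
    have hlen : ((pre ++ [c]).length : Int) = (pre.length : Int) + 1 := by
      simp [List.length_append]
    by_cases h : (c.length : Int) > (b.length : Int)
    · simp only [pvScanA, h, if_true]
      have hc : PySem.List.pyGet? ((pre ++ [c]) ++ t) (pre.length : Int) = some c := by
        rw [← hassoc]; exact PySem.List.pyGet?_append_length pre t c
      have := ih (pre ++ [c]) c (pre.length : Int) hc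
      rw [hlen] at this
      rw [hassoc]
      have hfold : pvBfold b (c :: t) = pvBfold c t := by
        simp only [pvBfold, List.foldl_cons]
        have : b.length < c.length := by exact_mod_cast h
        simp [this]
      rw [hfold]
      exact this
    · simp only [pvScanA, h, if_false]
      have hb' : PySem.List.pyGet? ((pre ++ [c]) ++ t) i = some b := by
        rw [← hassoc]; exact hb
      have := ih (pre ++ [c]) b i hb'
      rw [hlen] at this
      rw [hassoc]
      have hfold : pvBfold b (c :: t) = pvBfold b t := by
        simp only [pvBfold, List.foldl_cons]
        have : ¬ (b.length < c.length) := by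
          intro hlt; exact h (by exact_mod_cast hlt)
        simp [this]
      rw [hfold]
      exact this

-- ===== VERDICT (by name: the statement is the Claim_ definition above) =====
theorem get_max_ref_constraint_spec : Claim_equal_get_max_ref_constraint := by
  intro hyp ref cutoff _
  unfold Spec_get_max_ref_constraint
  simp only [get_max_ref_constraint, get_max_ref_constraint_alt]
  have hA := pvLoopA (fun t => PySem.Set.contains (PySem.Set.ofList hyp) t) ref [] []
  simp only [List.nil_append] at hA
  rw [hA]
  rw [show pvCons ref (pvBounds (fun t => PySem.Set.contains (PySem.Set.ofList hyp) t) ref)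
        = pvSC (fun t => PySem.Set.contains (PySem.Set.ofList hyp) t) ref from rfl,
      pvSC_eq_runs (fun t => PySem.Set.contains (PySem.Set.ofList hyp) t) ref]
  set key := fun t => PySem.Set.contains (PySem.Set.ofList hyp) t with hkey
  cases hcs : pvRuns key [] ref with
  | nil => simp
  | cons c0 t =>
    have hne : ∀ c ∈ pvRuns key [] ref, c ≠ [] := fun c hc => pvRuns_ne_nil key ref [] c hc
    have hc0 : c0 ≠ [] := hne c0 (by rw [hcs]; exact List.mem_cons_self)
    have hc0len : 0 < c0.length := List.length_pos_iff.mpr hc0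
    simp only [List.isEmpty_cons, List.length_cons, Nat.zero_lt_succ, if_true, Bool.false_eq_true,
      if_false]
    rw [PySem.List.enumerate_cons, List.foldl_cons]
    have hpos : ((c0.length : Int)) > 0 := by exact_mod_cast hc0len
    have hstep : pvScanA (0, 0) (0, c0) = ((c0.length : Int), 0) := by
      simp only [pvScanA]
      rw [if_pos hpos]
    rw [hstep]
    have hget : PySem.List.pyGet? ([c0] ++ t) (0 : Int) = some c0 :=
      PySem.List.pyGet?_zero_cons c0 t
    have hmain := pvScanA_spec t [c0] c0 0 hget
    simp only [List.singleton_append, List.length_cons, List.length_nil, Nat.cast_one,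
      zero_add] at hmain
    simp only [zero_add]
    rw [hmain.1, pvMax?_cons t c0]
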